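-- pv_equiv track=rewrite | github.com/linhdvu14/cp-sols | sols/CodeForces/1637_g/B_MEX_and_Array.py | solve
-- ===== SOURCE A (Python) =====
-- def solve(N, A):
--     res = 0
--     for i in range(N):
--         for j in range(i, N):
--             zero = 0
--             for k in range(i, j+1):
--                 if A[k] == 0:
--                     zero += 1
--             res += zero + j - i + 1
--     return res
-- ===== SOURCE B (Python) =====
-- def solve(N, A):
--     # Per-position contribution: position k lies in (k+1)*(N-k) of the
--     # subarrays [i..j]; it contributes 1 to each subarray's length and,
--     # if A[k] == 0, another 1 to that subarray's zero count.
--     total = 0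
--     for k in range(N):
--         c = (k + 1) * (N - k)
--         if A[k] == 0:
--             total += 2 * c
--         else:
--             total += c
--     return total
-- ===== Notes on version B (the rewrite author's own statement) =====
-- stated objective: faster
-- what changed: Replaces the triple loop over all subarrays with a single pass that adds each position's per-element contribution (k+1)*(N-k), doubled when A[k] == 0.
import Mathlib
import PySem

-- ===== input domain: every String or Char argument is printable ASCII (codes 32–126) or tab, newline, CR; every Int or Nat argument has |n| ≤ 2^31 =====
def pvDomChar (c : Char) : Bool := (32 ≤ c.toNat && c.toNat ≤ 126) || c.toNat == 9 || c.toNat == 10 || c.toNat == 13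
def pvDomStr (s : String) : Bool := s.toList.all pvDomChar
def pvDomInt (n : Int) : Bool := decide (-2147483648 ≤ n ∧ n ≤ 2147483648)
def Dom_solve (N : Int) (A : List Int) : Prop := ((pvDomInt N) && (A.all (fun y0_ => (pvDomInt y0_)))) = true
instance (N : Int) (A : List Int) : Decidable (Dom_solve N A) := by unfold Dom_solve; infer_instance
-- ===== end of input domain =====

-- B replaces A's O(N^3) triple loop over all subarrays by a single O(N) pass
-- adding each position's per-element contribution (k+1)*(N-k), doubled on zeros.


-- ===== PORT A =====
-- A[k] is ported with pyGetD; Pre_solve guarantees every index 0 ≤ k < N is in range.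
def solve (N : Int) (A : List Int) : Int :=
  (PySem.List.pyRange 0 N 1).foldl (fun res i =>
    (PySem.List.pyRange i N 1).foldl (fun res j =>
      let zero : Int := (PySem.List.pyRange i (j + 1) 1).foldl
        (fun zero k => if PySem.List.pyGetD A k 1 = 0 then zero + 1 else zero) 0
      res + (zero + j - i + 1)) res) 0

-- ===== PORT B =====
def solve_alt (N : Int) (A : List Int) : Int :=
  (PySem.List.pyRange 0 N 1).foldl (fun total k =>
    let c : Int := (k + 1) * (N - k)
    if PySem.List.pyGetD A k 1 = 0 then total + 2 * c else total + c) 0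

-- ===== PRECONDITION & SPEC =====
-- A indexes A[k] for every 0 ≤ k < N, so it raises IndexError iff N > len(A).
def Pre_solve (N : Int) (A : List Int) : Prop := N ≤ (A.length : Int)
instance (N : Int) (A : List Int) : Decidable (Pre_solve N A) := by unfold Pre_solve; infer_instance
def pvWitness_solve : Int × List Int := (3, [0, 5, 0])

def Spec_solve (N : Int) (A : List Int) (out : Int) : Prop := out = solve_alt N A
instance (N : Int) (A : List Int) (out : Int) : Decidable (Spec_solve N A out) := by unfold Spec_solve; infer_instance

-- ===== CLAIM (what is proved, stated in full; the proofs are below) =====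
def Claim_equal_solve : Prop := ∀ (N : Int) (A : List Int), Dom_solve N A → Pre_solve N A → Spec_solve N A (solve N A)

-- ===== LEMMAS AND PROOFS =====

-- the per-element weight: 2 for zeros, 1 otherwise
def pvW (A : List Int) (k : Int) : Int := if PySem.List.pyGetD A k 1 = 0 then 2 else 1

-- a list-map sum is additive
theorem pv_sum_map_add {α : Type} (l : List α) (f g : α → Int) :
    (l.map (fun x => f x + g x)).sum = (l.map f).sum + (l.map g).sum := by
  induction l with
  | nil => simp
  | cons x xs ih => simp only [List.map_cons, List.sum_cons, ih]; ring

theorem pv_sum_map_const {α : Type} (l : List α) (c : Int) :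
    (l.map (fun _ => c)).sum = (l.length : Int) * c := by
  induction l with
  | nil => simp
  | cons x xs ih => simp only [List.map_cons, List.sum_cons, ih, List.length_cons]; push_cast; ring

-- 'zero += 1 under a test' fold as a 0/1 map-sum
theorem pv_foldl_count {α : Type} (l : List α) (p : α → Prop) [DecidablePred p] (a : Int) :
    l.foldl (fun acc x => if p x then acc + 1 else acc) a
    = a + (l.map (fun x => if p x then (1 : Int) else 0)).sum := by
  induction l generalizing a with
  | nil => simp
  | cons x xs ih => simp only [List.foldl_cons, List.map_cons, List.sum_cons, ih]; split_ifs <;> ring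

-- 'total += f or g under a test' fold as a map-sum
theorem pv_foldl_ite_add {α : Type} (l : List α) (p : α → Prop) [DecidablePred p]
    (f g : α → Int) (a : Int) :
    l.foldl (fun acc x => if p x then acc + f x else acc + g x) a
    = a + (l.map (fun x => if p x then f x else g x)).sum := by
  induction l generalizing a with
  | nil => simp
  | cons x xs ih => simp only [List.foldl_cons, List.map_cons, List.sum_cons, ih]; split_ifs <;> ring

-- ∑_{i∈[0,M)} ∑_{k∈[i,M)} w k = ∑_{k∈[0,M)} (k+1) * w k
theorem pv_aux1 (w : Int → Int) (M : Int) :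
    ((PySem.List.pyRange 0 M 1).map
      (fun i => ((PySem.List.pyRange i M 1).map w).sum)).sum
    = ((PySem.List.pyRange 0 M 1).map (fun k => (k + 1) * w k)).sum := by
  by_cases hM : 0 ≤ M
  · induction M, hM using Int.le_induction with
    | base => rw [PySem.List.pyRange_one_eq_nil (le_refl (0 : Int))]; simp
    | succ M hM ih =>
      rw [PySem.List.pyRange_one_succ_right (by omega : (0 : Int) ≤ M)]
      have hmap : (PySem.List.pyRange 0 M 1).map
            (fun i => ((PySem.List.pyRange i (M + 1) 1).map w).sum)
          = (PySem.List.pyRange 0 M 1).map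
            (fun i => ((PySem.List.pyRange i M 1).map w).sum + w M) := by
        apply List.map_congr_left; intro i hi
        have h := (PySem.List.mem_pyRange_one).1 hi
        rw [PySem.List.pyRange_one_succ_right (by omega : i ≤ M)]
        simp
      rw [List.map_append, List.map_append, List.sum_append, List.sum_append, hmap,
        pv_sum_map_add, pv_sum_map_const, PySem.List.length_pyRange_one]
      have hlen : (((M - 0).toNat : Int)) = M := by omega
      rw [hlen, ih]
      simp only [List.map_cons, List.map_nil, List.sum_cons, List.sum_nil, add_zero]
      rw [PySem.List.pyRange_one_singleton]
      simp only [List.map_cons, List.map_nil, List.sum_cons, List.sum_nil, add_zero]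
      ring
  · rw [PySem.List.pyRange_one_eq_nil (by omega : M ≤ (0 : Int))]; simp

-- the triple sum over subarrays equals the weighted single sum
theorem pv_aux2 (w : Int → Int) (N : Int) :
    ((PySem.List.pyRange 0 N 1).map (fun i =>
      ((PySem.List.pyRange i N 1).map (fun j =>
        ((PySem.List.pyRange i (j + 1) 1).map w).sum)).sum)).sum
    = ((PySem.List.pyRange 0 N 1).map (fun k => (k + 1) * (N - k) * w k)).sum := by
  by_cases hN : 0 ≤ N
  · induction N, hN using Int.le_induction with
    | base => rw [PySem.List.pyRange_one_eq_nil (le_refl (0 : Int))]; simp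
    | succ N hN ih =>
      rw [PySem.List.pyRange_one_succ_right (by omega : (0 : Int) ≤ N)]
      -- split each inner row [i, N+1) at j = N
      have hrow : (PySem.List.pyRange 0 N 1).map (fun i =>
            ((PySem.List.pyRange i (N + 1) 1).map (fun j =>
              ((PySem.List.pyRange i (j + 1) 1).map w).sum)).sum)
          = (PySem.List.pyRange 0 N 1).map (fun i =>
            ((PySem.List.pyRange i N 1).map (fun j =>
              ((PySem.List.pyRange i (j + 1) 1).map w).sum)).sum
            + ((PySem.List.pyRange i (N + 1) 1).map w).sum) := by
        apply List.map_congr_left; intro i hi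
        have h := (PySem.List.mem_pyRange_one).1 hi
        conv_lhs => rw [PySem.List.pyRange_one_succ_right (by omega : i ≤ N)]
        simp
      rw [List.map_append, List.map_append, List.sum_append, List.sum_append, hrow,
        pv_sum_map_add, ih]
      simp only [List.map_cons, List.map_nil, List.sum_cons, List.sum_nil, add_zero]
      rw [PySem.List.pyRange_one_singleton]
      simp only [List.map_cons, List.map_nil, List.sum_cons, List.sum_nil, add_zero]
      rw [PySem.List.pyRange_one_singleton]
      simp only [List.map_cons, List.map_nil, List.sum_cons, List.sum_nil, add_zero]
      -- collect the new column: ∑_{i∈[0,N+1)} ∑_{k∈[i,N+1)} w k, via pv_aux1 at N+1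
      have hcol := pv_aux1 w (N + 1)
      rw [PySem.List.pyRange_one_succ_right (by omega : (0 : Int) ≤ N)] at hcol
      rw [List.map_append, List.map_append, List.sum_append, List.sum_append] at hcol
      simp only [List.map_cons, List.map_nil, List.sum_cons, List.sum_nil, add_zero] at hcol
      rw [PySem.List.pyRange_one_singleton] at hcol
      simp only [List.map_cons, List.map_nil, List.sum_cons, List.sum_nil, add_zero] at hcol
      -- rewrite the new right-hand weights (k+1)*(N+1-k) = (k+1)*(N-k) + (k+1)
      have hw : (PySem.List.pyRange 0 N 1).map (fun k => (k + 1) * (N + 1 - k) * w k)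
          = (PySem.List.pyRange 0 N 1).map
            (fun k => (k + 1) * (N - k) * w k + (k + 1) * w k) := by
        apply List.map_congr_left; intro k _; ring
      rw [hw, pv_sum_map_add]
      linarith [hcol]
  · rw [PySem.List.pyRange_one_eq_nil (by omega : N ≤ (0 : Int))]; simp

-- solve as a triple map-sum of the weight pvW
theorem pv_solve_eq (N : Int) (A : List Int) :
    solve N A
    = ((PySem.List.pyRange 0 N 1).map (fun i =>
        ((PySem.List.pyRange i N 1).map (fun j =>
          ((PySem.List.pyRange i (j + 1) 1).map (pvW A)).sum)).sum)).sum := by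
  unfold solve
  simp only [pv_foldl_count (p := fun k => PySem.List.pyGetD A k 1 = 0), zero_add,
    PySem.List.foldl_add]
  apply congrArg List.sum
  apply List.map_congr_left; intro i _
  apply congrArg List.sum
  apply List.map_congr_left; intro j hj
  have hij := (PySem.List.mem_pyRange_one).1 hj
  have hw : (PySem.List.pyRange i (j + 1) 1).map (pvW A)
      = (PySem.List.pyRange i (j + 1) 1).map
        (fun k => (if PySem.List.pyGetD A k 1 = 0 then (1 : Int) else 0) + 1) := by
    apply List.map_congr_left; intro k _
    by_cases h : PySem.List.pyGetD A k 1 = 0 <;> simp [pvW, h]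
  rw [hw, pv_sum_map_add, pv_sum_map_const, PySem.List.length_pyRange_one]
  have : (((j + 1 - i).toNat : Int)) = j + 1 - i := by omega
  rw [this]; ring

-- solve_alt as the weighted single sum
theorem pv_alt_eq (N : Int) (A : List Int) :
    solve_alt N A
    = ((PySem.List.pyRange 0 N 1).map (fun k => (k + 1) * (N - k) * pvW A k)).sum := by
  unfold solve_alt
  rw [pv_foldl_ite_add (PySem.List.pyRange 0 N 1)
    (fun k => PySem.List.pyGetD A k 1 = 0)
    (fun k => 2 * ((k + 1) * (N - k))) (fun k => (k + 1) * (N - k)) 0, zero_add]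
  apply congrArg List.sum
  apply List.map_congr_left; intro k _
  by_cases h : PySem.List.pyGetD A k 1 = 0
  · simp [pvW, h]; ring
  · simp [pvW, h]

-- ===== VERDICT (by name: the statement is the Claim_ definition above) =====
theorem solve_spec : Claim_equal_solve := by
  intro N A _ _
  unfold Spec_solve
  rw [pv_solve_eq, pv_alt_eq, pv_aux2]
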